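-- pv_equiv track=rewrite | github.com/hobin01/baekjoon | python/16936.py | calc
-- ===== SOURCE A (Python) =====
-- def calc(num, cnt, arr, result):
--     num2 = num * 2
--     num3 = num // 3
--     r = num % 3
--
--     if cnt == len(arr):
--         return result
--
--     if num2 in arr:
--         result.append(num2)
--         return calc(num2, cnt + 1, arr, result)
--
--     elif r == 0 and num3 in arr:
--         result.append(num3)
--         return calc(num3, cnt + 1, arr, result)
--
--     else:
--         result = []
--         cnt = 0
--         return result
-- ===== SOURCE B (Python) =====
-- def _step(num, arr):
--     if num * 2 in arr:
--         return num * 2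
--     if num % 3 == 0 and num // 3 in arr:
--         return num // 3
--     return None
--
--
-- def calc(num, cnt, arr, result):
--     while cnt != len(arr):
--         nxt = _step(num, arr)
--         if nxt is None:
--             return []
--         result.append(nxt)
--         num = nxt
--         cnt += 1
--     return result
-- ===== Notes on version B (the rewrite author's own statement) =====
-- stated objective: idiomatic
-- what changed: Tail recursion replaced by an iterative while loop with the successor computation (double / exact third lookup) extracted into a helper returning Optional; same mutation of result.
import Mathlib
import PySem

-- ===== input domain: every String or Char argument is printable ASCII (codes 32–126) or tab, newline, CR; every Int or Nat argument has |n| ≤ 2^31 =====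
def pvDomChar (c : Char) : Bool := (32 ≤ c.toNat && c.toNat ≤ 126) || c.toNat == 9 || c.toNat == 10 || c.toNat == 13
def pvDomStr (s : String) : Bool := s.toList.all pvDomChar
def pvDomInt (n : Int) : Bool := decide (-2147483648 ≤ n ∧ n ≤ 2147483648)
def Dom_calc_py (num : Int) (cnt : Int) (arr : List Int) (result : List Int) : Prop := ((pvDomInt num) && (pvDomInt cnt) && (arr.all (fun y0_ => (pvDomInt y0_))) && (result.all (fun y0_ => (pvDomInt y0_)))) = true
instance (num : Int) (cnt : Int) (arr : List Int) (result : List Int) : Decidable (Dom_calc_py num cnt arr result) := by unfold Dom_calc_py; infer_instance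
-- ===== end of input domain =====

-- B replaces A's tail recursion by an iterative loop with the successor lookup extracted
-- into an Option-returning helper (objective: idiomatic); both mutate `result` identically,
-- and the equivalence proved is about the returned value.

-- ===== PORT A =====
-- Literal port of A's recursion; the fuel parameter is only a totality guard: on every
-- input admitted by Pre_calc_py the Python recursion terminates within the given fuel.
def calcA_go (fuel : Nat) (num : Int) (cnt : Int) (arr : List Int) (result : List Int) : List Int :=
  match fuel with
  | 0 => []
  | fuel + 1 =>
    let num2 := num * 2
    let num3 := PySem.Int.floordiv num 3
    let r := PySem.Int.mod num 3
    if cnt = (arr.length : Int) then result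
    else if arr.contains num2 then calcA_go fuel num2 (cnt + 1) arr (result ++ [num2])
    else if r = 0 ∧ arr.contains num3 = true then calcA_go fuel num3 (cnt + 1) arr (result ++ [num3])
    else []

def calc_py (num : Int) (cnt : Int) (arr : List Int) (result : List Int) : List Int :=
  calcA_go (((arr.length : Int) - cnt).toNat + arr.length + 2) num cnt arr result

-- ===== PORT B =====
def stepB (num : Int) (arr : List Int) : Option Int :=
  if arr.contains (num * 2) then some (num * 2)
  else if PySem.Int.mod num 3 = 0 ∧ arr.contains (PySem.Int.floordiv num 3) = true then
    some (PySem.Int.floordiv num 3)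
  else none

-- the while loop of Source B; fuel is the same totality guard
def calcB_go (fuel : Nat) (num : Int) (cnt : Int) (arr : List Int) (result : List Int) : List Int :=
  match fuel with
  | 0 => []
  | fuel + 1 =>
    if cnt = (arr.length : Int) then result
    else
      match stepB num arr with
      | none => []
      | some nxt => calcB_go fuel nxt (cnt + 1) arr (result ++ [nxt])

def calc_py_alt (num : Int) (cnt : Int) (arr : List Int) (result : List Int) : List Int :=
  calcB_go (((arr.length : Int) - cnt).toNat + arr.length + 2) num cnt arr result

-- ===== PRECONDITION & SPEC =====
-- Pre_ excludes only the constant-zero chain (num = 0 with 0 ∈ arr) started with cnt above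
-- len(arr) or more than 900 below it: there A never terminates resp. recurses deeper than
-- CPython's stack and raises RecursionError (B's loop diverges on the former as well).
def Pre_calc_py (num : Int) (cnt : Int) (arr : List Int) (result : List Int) : Prop :=
  ¬ (num = 0 ∧ (0 : Int) ∈ arr ∧ (cnt > (arr.length : Int) ∨ (arr.length : Int) - cnt > 900))
instance (num : Int) (cnt : Int) (arr : List Int) (result : List Int) : Decidable (Pre_calc_py num cnt arr result) := by unfold Pre_calc_py; infer_instance

def pvWitness_calc_py : Int × Int × List Int × List Int := (1, 1, [4, 8, 1, 2], [1])

def Spec_calc_py (num : Int) (cnt : Int) (arr : List Int) (result : List Int) (out : List Int) : Prop := out = calc_py_alt num cnt arr result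
instance (num : Int) (cnt : Int) (arr : List Int) (result : List Int) (out : List Int) : Decidable (Spec_calc_py num cnt arr result out) := by unfold Spec_calc_py; infer_instance

-- ===== CLAIM (what is proved, stated in full; the proofs are below) =====
def Claim_equal_calc_py : Prop := ∀ (num : Int) (cnt : Int) (arr : List Int) (result : List Int), Dom_calc_py num cnt arr result → Pre_calc_py num cnt arr result → Spec_calc_py num cnt arr result (calc_py num cnt arr result)

-- ===== LEMMAS AND PROOFS =====
lemma go_eq (fuel : Nat) : ∀ (num cnt : Int) (arr result : List Int),
    calcA_go fuel num cnt arr result = calcB_go fuel num cnt arr result := by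
  induction fuel with
  | zero => intro num cnt arr result; rfl
  | succ f ih =>
    intro num cnt arr result
    simp only [calcA_go, calcB_go, stepB]
    split_ifs <;> simp_all [ih]

-- ===== VERDICT (by name: the statement is the Claim_ definition above) =====
theorem calc_py_spec : Claim_equal_calc_py := by
  intro num cnt arr result _ _
  unfold Spec_calc_py calc_py calc_py_alt
  exact go_eq _ num cnt arr result
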